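-- pv_equiv track=rewrite | github.com/mukerem/A2SV_ACL23 | A2SV_ACL23_Knockout_stage.py | disjoint_count_2
-- ===== SOURCE A (Python) =====
-- def disjoint_count_2(arr, k):
--     f = {}
--
--     for i in arr:
--         f[i] = f.get(i, 0) + 1
--
--     maxx = max(list(f.values()))
--     n = len(arr)
--     size = n // maxx
--
--     return size >= k
-- ===== SOURCE B (Python) =====
-- def disjoint_count_2(arr, k):
--     s = sorted(arr)
--     maxx = 0
--     run = 0
--     prev = None
--     for x in s:
--         if run > 0 and x == prev:
--             run += 1
--         else:
--             run = 1
--         prev = x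
--         if run > maxx:
--             maxx = run
--     size = len(arr) // maxx
--     return size >= k
-- ===== Notes on version B (the rewrite author's own statement) =====
-- stated objective: alternative
-- what changed: Replaces the hash-map frequency dictionary with sort-then-scan: the maximum frequency is the longest run of equal consecutive values in sorted(arr), no dictionary is built.
import Mathlib
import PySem

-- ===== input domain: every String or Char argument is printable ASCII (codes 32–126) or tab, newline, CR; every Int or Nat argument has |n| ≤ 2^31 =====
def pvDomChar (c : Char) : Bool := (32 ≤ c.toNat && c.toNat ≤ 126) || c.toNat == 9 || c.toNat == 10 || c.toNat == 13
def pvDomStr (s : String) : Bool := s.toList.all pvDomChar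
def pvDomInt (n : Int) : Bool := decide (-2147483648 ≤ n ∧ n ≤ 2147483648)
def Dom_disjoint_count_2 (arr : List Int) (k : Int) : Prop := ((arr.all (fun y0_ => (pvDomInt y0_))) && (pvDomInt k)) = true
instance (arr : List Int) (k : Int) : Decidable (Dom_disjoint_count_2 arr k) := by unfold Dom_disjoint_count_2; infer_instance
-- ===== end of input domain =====

-- B replaces A's hash-map frequency dictionary with sort-then-scan (longest equal run of sorted(arr)); alternative algorithm, no dict.


-- ===== PORT A =====
-- f = {}; for i in arr: f[i] = f.get(i, 0) + 1; maxx = max(list(f.values())); n = len(arr); size = n // maxx; return size >= k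
def disjoint_count_2 (arr : List Int) (k : Int) : Bool :=
  let f : PySem.Dict Int Int := arr.foldl (fun d i => d.insert i (d.getD i 0 + 1)) PySem.Dict.empty
  match PySem.List.max? (PySem.Dict.values f) (fun y => y) with
  | none => false   -- Python raises ValueError here (arr = []); excluded by Pre_
  | some maxx =>
    let n : Int := (arr.length : Int)
    let size := PySem.Int.floordiv n maxx
    decide (size ≥ k)

-- ===== PORT B =====
-- s = sorted(arr); scan s keeping (maxx, run, prev); size = len(arr) // maxx; return size >= k
-- loop body: if run > 0 and x == prev: run += 1 else run = 1; prev = x; if run > maxx: maxx = run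
def dc2Step (st : Int × Int × Option Int) (x : Int) : Int × Int × Option Int :=
  let run := if 0 < st.2.1 ∧ st.2.2 = some x then st.2.1 + 1 else 1
  let maxx := if st.1 < run then run else st.1
  (maxx, run, some x)

def disjoint_count_2_alt (arr : List Int) (k : Int) : Bool :=
  let s := PySem.List.sorted arr (fun y => y) false
  let st := s.foldl dc2Step (0, 0, none)
  decide (PySem.Int.floordiv (arr.length : Int) st.1 ≥ k)

-- ===== PRECONDITION & SPEC =====
-- A raises ValueError (max of an empty sequence) on arr = []; Pre_ excludes exactly that.
def Pre_disjoint_count_2 (arr : List Int) (k : Int) : Prop := arr ≠ []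
instance (arr : List Int) (k : Int) : Decidable (Pre_disjoint_count_2 arr k) := by unfold Pre_disjoint_count_2; infer_instance
def pvWitness_disjoint_count_2 : List Int × Int := ([1, 2, 1], 1)
def Spec_disjoint_count_2 (arr : List Int) (k : Int) (out : Bool) : Prop := out = disjoint_count_2_alt arr k
instance (arr : List Int) (k : Int) (out : Bool) : Decidable (Spec_disjoint_count_2 arr k out) := by unfold Spec_disjoint_count_2; infer_instance

-- ===== CLAIM (what is proved, stated in full; the proofs are below) =====
def Claim_equal_disjoint_count_2 : Prop := ∀ (arr : List Int) (k : Int), Dom_disjoint_count_2 arr k → Pre_disjoint_count_2 arr k → Spec_disjoint_count_2 arr k (disjoint_count_2 arr k)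

-- ===== LEMMAS AND PROOFS =====

-- in a ≤-sorted list every element is bounded by the last one
lemma le_getLast_of_pairwise (p : List Int) (hp : p.Pairwise (· ≤ ·)) (hne : p ≠ []) :
    ∀ a ∈ p, a ≤ p.getLast hne := by
  induction p using List.reverseRecOn with
  | nil => cases hne rfl
  | append_singleton q x ih =>
    intro a ha
    have hlast : (q ++ [x]).getLast hne = x := List.getLast_append _
    rw [hlast]
    rcases List.mem_append.mp ha with h | h
    · exact (List.pairwise_append.mp hp).2.2 a h x (List.mem_singleton_self x)
    · rw [List.mem_singleton.mp h]

-- invariant of B's scan over a ≤-sorted list: prev is the last element, run is its count,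
-- maxx is attained by some count and bounds every count
lemma dc2_scan_inv (p : List Int) (hp : p.Pairwise (· ≤ ·)) (hne : p ≠ []) :
    (p.foldl dc2Step (0, 0, none)).2.2 = some (p.getLast hne) ∧
    (p.foldl dc2Step (0, 0, none)).2.1 = (p.count (p.getLast hne) : Int) ∧
    (∃ y ∈ p, (p.foldl dc2Step (0, 0, none)).1 = (p.count y : Int)) ∧
    (∀ y ∈ p, (p.count y : Int) ≤ (p.foldl dc2Step (0, 0, none)).1) := by
  induction p using List.reverseRecOn with
  | nil => cases hne rfl
  | append_singleton q x ih =>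
    rcases eq_or_ne q [] with hq | hq
    · subst hq
      refine ⟨rfl, ?_, ⟨x, by simp, ?_⟩, ?_⟩ <;> simp [dc2Step]
    · have hpq : q.Pairwise (· ≤ ·) := (List.pairwise_append.mp hp).1
      have hbx : ∀ a ∈ q, a ≤ x := fun a ha =>
        (List.pairwise_append.mp hp).2.2 a ha x (List.mem_singleton_self x)
      obtain ⟨hprev, hrun, ⟨y0, hy0, hy0e⟩, hub⟩ := ih hpq hq
      set st := q.foldl dc2Step (0, 0, (none : Option Int)) with hst
      have hfold : (q ++ [x]).foldl dc2Step (0, 0, (none : Option Int)) = dc2Step st x := by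
        rw [List.foldl_append]; rfl
      have hlast : (q ++ [x]).getLast (by simp) = x := List.getLast_append _
      set l := q.getLast hq with hl
      have hlmem : l ∈ q := List.getLast_mem hq
      have hmemq : ∀ y, y ∈ q ++ [x] → y ≠ x → y ∈ q := by
        intro y hy hyx
        rcases List.mem_append.mp hy with h | h
        · exact h
        · exact absurd (List.mem_singleton.mp h) hyx
      by_cases hxl : x = l
      · -- x extends the last run
        have hcnt : (q.count x : Int) = st.2.1 := by rw [hrun, hxl]
        have hlpos : 0 < q.count l := List.count_pos_iff.mpr hlmem
        have hcond : (0 < st.2.1 ∧ st.2.2 = some x) := by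
          refine ⟨by rw [hrun]; exact_mod_cast hlpos, by rw [hprev, hxl]⟩
        have hstep : dc2Step st x = ((if st.1 < st.2.1 + 1 then st.2.1 + 1 else st.1), st.2.1 + 1, some x) := by
          simp only [dc2Step]
          rw [if_pos hcond]
        have hcx : ((q ++ [x]).count x : Int) = (q.count x : Int) + 1 := by
          simp [List.count_append]
        have hco : ∀ y, y ≠ x → ((q ++ [x]).count y : Int) = (q.count y : Int) := by
          intro y hy
          simp [List.count_append, Ne.symm hy]
        refine ⟨?_, ?_, ?_, ?_⟩
        · rw [hfold, hstep, hlast]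
        · rw [hfold, hstep, hlast]
          show st.2.1 + 1 = _
          omega
        · rw [hfold, hstep]
          by_cases hm : st.1 < st.2.1 + 1
          · refine ⟨x, by simp, ?_⟩
            show (if st.1 < st.2.1 + 1 then st.2.1 + 1 else st.1) = _
            rw [if_pos hm]
            omega
          · refine ⟨y0, by simp [hy0], ?_⟩
            have hy0x : y0 ≠ x := by
              intro h
              subst h
              omega
            show (if st.1 < st.2.1 + 1 then st.2.1 + 1 else st.1) = _
            rw [if_neg hm, hy0e, hco y0 hy0x]
        · intro y hy
          rw [hfold, hstep]
          show _ ≤ (if st.1 < st.2.1 + 1 then st.2.1 + 1 else st.1)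
          rcases eq_or_ne y x with rfl | hyx
          · split <;> omega
          · rw [hco y hyx]
            have := hub y (hmemq y hy hyx)
            split <;> omega
      · -- x starts a fresh run: x cannot occur in q
        have hxq : x ∉ q := fun hmem =>
          hxl (le_antisymm (le_getLast_of_pairwise q hpq hq x hmem) (hbx l hlmem))
        have hcond : ¬ (0 < st.2.1 ∧ st.2.2 = some x) := by
          rintro ⟨-, h2⟩
          rw [hprev] at h2
          exact hxl (Option.some_injective _ h2).symm
        have hstep : dc2Step st x = ((if st.1 < 1 then 1 else st.1), 1, some x) := by
          simp only [dc2Step]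
          rw [if_neg hcond]
        have hcq : q.count x = 0 := List.count_eq_zero.mpr hxq
        have hcx1 : (q ++ [x]).count x = 1 := by simp [List.count_append, hcq]
        have hm1 : (1 : Int) ≤ st.1 := by
          have := List.count_pos_iff.mpr hy0
          omega
        have hco : ∀ y, y ≠ x → ((q ++ [x]).count y : Int) = (q.count y : Int) := by
          intro y hy
          simp [List.count_append, Ne.symm hy]
        refine ⟨?_, ?_, ?_, ?_⟩
        · rw [hfold, hstep, hlast]
        · rw [hfold, hstep, hlast]
          show (1 : Int) = _
          omega
        · refine ⟨y0, by simp [hy0], ?_⟩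
          have hy0x : y0 ≠ x := fun h => hxq (h ▸ hy0)
          rw [hfold, hstep]
          show (if st.1 < 1 then 1 else st.1) = _
          rw [if_neg (by omega), hy0e, hco y0 hy0x]
        · intro y hy
          rw [hfold, hstep]
          show _ ≤ (if st.1 < 1 then 1 else st.1)
          rw [if_neg (by omega)]
          rcases eq_or_ne y x with rfl | hyx
          · omega
          · rw [hco y hyx]
            exact hub y (hmemq y hy hyx)

-- ===== VERDICT (by name: the statement is the Claim_ definition above) =====
theorem disjoint_count_2_spec : Claim_equal_disjoint_count_2 := by
  intro arr k _ hne
  unfold Spec_disjoint_count_2 disjoint_count_2 disjoint_count_2_alt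
  -- B's side: scan of the sorted copy
  set s := PySem.List.sorted arr (fun y => y) false with hs
  have hperm : s.Perm arr := PySem.List.sorted_perm arr (fun y => y) false
  have hsp : s.Pairwise (· ≤ ·) := by
    have := PySem.List.sorted_pairwise arr (fun y => y)
    simpa using this
  have hsne : s ≠ [] := by
    intro h
    exact hne ((PySem.List.sorted_eq_nil_iff arr (fun y => y) false).mp h)
  obtain ⟨-, -, ⟨yB, hyB, hyBe⟩, hubB⟩ := dc2_scan_inv s hsp hsne
  -- A's side: the dict is the counter; its values are counts of the distinct elements
  have hf : arr.foldl (fun d i => d.insert i (d.getD i 0 + 1)) PySem.Dict.empty = PySem.Dict.counter arr :=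
    PySem.Dict.foldl_insert_getD_add_one_eq_counter arr
  have hvals : PySem.Dict.values (PySem.Dict.counter arr)
      = (PySem.Set.ofList arr).map (fun x => (arr.count x : Int)) := by
    show (PySem.Dict.items (PySem.Dict.counter arr)).map (·.2) = _
    rw [PySem.Dict.items_counter]
    simp
  have hvne : (PySem.Set.ofList arr).map (fun x => (arr.count x : Int)) ≠ [] := by
    simp only [ne_eq, List.map_eq_nil_iff]
    intro h
    rcases List.exists_mem_of_ne_nil arr hne with ⟨a, ha⟩
    have := PySem.Set.mem_ofList arr a
    rw [h] at this; simp [ha] at this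
  obtain ⟨mA, hmA⟩ : ∃ m, PySem.List.max? ((PySem.Set.ofList arr).map (fun x => (arr.count x : Int))) (fun y => y) = some m := by
    rcases h : PySem.List.max? ((PySem.Set.ofList arr).map (fun x => (arr.count x : Int))) (fun y => y) with _ | m
    · exact absurd ((PySem.List.max?_eq_none_iff _ _).mp h) hvne
    · exact ⟨m, rfl⟩
  -- the two maxima agree
  have hcount : ∀ y, s.count y = arr.count y := fun y => hperm.count_eq y
  have hmem : ∀ y, y ∈ s ↔ y ∈ arr := fun y => hperm.mem_iff
  have hAB : mA = (s.foldl dc2Step (0, 0, none)).1 := by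
    apply le_antisymm
    · obtain ⟨xA, hxA, hxAe⟩ := List.mem_map.mp (PySem.List.max?_mem hmA)
      rw [← hxAe]
      calc (arr.count xA : Int) = (s.count xA : Int) := by rw [hcount]
        _ ≤ _ := hubB xA ((hmem xA).mpr ((PySem.Set.mem_ofList arr xA).mp hxA))
    · rw [hyBe, hcount yB]
      exact PySem.List.max?_isMax hmA _
        (List.mem_map.mpr ⟨yB, (PySem.Set.mem_ofList arr yB).mpr ((hmem yB).mp hyB), rfl⟩)
  simp only [hf, hvals, hmA, hAB]
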